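-- pv_equiv track=rewrite | github.com/keeeeeey/baekjoon_algorithm | 시험/스케터2-2.py | solution
-- ===== SOURCE A (Python) =====
-- def solution(grade):
--     answer = []
--     n = len(grade)
--     list = []
--
--     for i in range(n):
--         list.append([i, grade[i]])
--
--     list.sort(key=lambda x: -x[1])
--
--     order = 1
--     cnt = 1
--     list[0].append(1)
--     for i in range(1, n):
--         if list[i][1] == list[i - 1][1]:
--             list[i].append(order)
--             cnt += 1
--         else:
--             order += cnt
--             list[i].append(order)
--             cnt = 1
--
--     list.sort(key=lambda x: x[0])
--
--     for i in range(n):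
--         answer.append(list[i][2])
--
--     return answer
-- ===== SOURCE B (Python) =====
-- def solution(grade):
--     # Competition rank: 1 + number of strictly greater grades.
--     return [1 + sum(1 for h in grade if h > g) for g in grade]
-- ===== Notes on version B (the rewrite author's own statement) =====
-- stated objective: simpler
-- what changed: Replaces sort / tie-group rank assignment / re-sort-by-index bookkeeping with a direct one-line count: each rank is 1 plus the number of strictly greater grades.
import Mathlib
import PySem

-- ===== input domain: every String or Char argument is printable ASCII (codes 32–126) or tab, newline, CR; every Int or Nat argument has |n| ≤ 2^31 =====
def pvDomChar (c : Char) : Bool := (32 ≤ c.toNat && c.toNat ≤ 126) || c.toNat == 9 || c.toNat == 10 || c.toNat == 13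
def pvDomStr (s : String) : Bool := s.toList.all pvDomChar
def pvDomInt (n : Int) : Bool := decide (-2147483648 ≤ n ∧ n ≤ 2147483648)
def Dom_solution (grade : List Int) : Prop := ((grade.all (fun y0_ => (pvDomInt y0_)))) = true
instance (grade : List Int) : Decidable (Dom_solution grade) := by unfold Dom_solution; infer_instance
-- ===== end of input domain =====

-- B replaces A's sort / tie-group rank loop / re-sort-by-index bookkeeping with a direct
-- strictly-greater count per element (simpler; same return values on non-empty input).

-- ===== PORT A =====
-- the 'for i in range(1, n)' rank-assignment loop, walking the descending-sorted tail;
-- prev = list[i-1][1], order/cnt as in A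
def rankLoop (prev order cnt : Int) : List (Int × Int) → List (Int × Int × Int)
  | [] => []
  | (i, g) :: rest =>
      if g = prev then (i, g, order) :: rankLoop g order (cnt + 1) rest
      else (i, g, order + cnt) :: rankLoop g (order + cnt) 1 rest

def solution (grade : List Int) : List Int :=
  let n : Int := (grade.length : Int)
  -- for i in range(n): list.append([i, grade[i]])  (index always in range, so pyGetD is exact)
  let lst : List (Int × Int) :=
    (PySem.List.pyRange 0 n 1).foldl (fun acc i => acc ++ [(i, PySem.List.pyGetD grade i 0)]) []
  let s := PySem.List.sorted lst (fun p => -p.2) false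
  match s with
  | [] => []   -- Python raises IndexError at list[0] here; excluded by Pre_solution
  | p0 :: rest =>
      let ranked := (p0.1, p0.2, (1 : Int)) :: rankLoop p0.2 1 1 rest
      let byIdx := PySem.List.sorted ranked (fun t => t.1) false
      byIdx.foldl (fun acc t => acc ++ [t.2.2]) []

-- ===== PORT B =====
def solution_alt (grade : List Int) : List Int :=
  grade.map (fun g => 1 + (grade.countP (fun h => g < h) : Int))

-- ===== PRECONDITION & SPEC =====
-- Pre_ excludes only the empty list, on which A raises IndexError (list[0].append on an empty list).
def Pre_solution (grade : List Int) : Prop := grade ≠ []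
instance (grade : List Int) : Decidable (Pre_solution grade) := by unfold Pre_solution; infer_instance
def pvWitness_solution : List Int := [3, 1, 3, 2]

def Spec_solution (grade : List Int) (out : List Int) : Prop := out = solution_alt grade
instance (grade : List Int) (out : List Int) : Decidable (Spec_solution grade out) := by unfold Spec_solution; infer_instance

-- ===== CLAIM (what is proved, stated in full; the proofs are below) =====
def Claim_equal_solution : Prop := ∀ (grade : List Int), Dom_solution grade → Pre_solution grade → Spec_solution grade (solution grade)

-- ===== LEMMAS AND PROOFS =====

-- invariant of A's rank loop on a weakly descending tail: order = 1 + G (greater so far),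
-- cnt = E (equal-to-prev so far); the rank written is 1 + #(strictly greater in the whole list)
lemma rankLoop_spec (prev G E : Int) (s : List (Int × Int))
    (hs : s.Pairwise (fun a b => b.2 ≤ a.2))
    (hle : ∀ p ∈ s, p.2 ≤ prev) :
    rankLoop prev (1 + G) E s
      = s.map (fun p => (p.1, p.2,
          1 + G + (if p.2 < prev then E else 0) + (s.countP (fun q => p.2 < q.2) : Int))) := by
  induction s generalizing prev G E with
  | nil => rfl
  | cons h t ih =>
    obtain ⟨i, g⟩ := h
    have hgle : g ≤ prev := hle (i, g) (by simp)
    have htle : ∀ p ∈ t, p.2 ≤ g := by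
      intro p hp; exact (List.pairwise_cons.mp hs).1 p hp
    have htp : t.Pairwise (fun a b => b.2 ≤ a.2) := (List.pairwise_cons.mp hs).2
    by_cases hgp : g = prev
    · simp only [rankLoop, if_pos hgp]
      rw [ih g G (E + 1) htp htle]
      subst hgp
      simp only [List.map_cons]
      refine List.cons_eq_cons.mpr ⟨?_, ?_⟩
      · simp only [Prod.mk.injEq, true_and]
        have hc : ((i, g) :: t).countP (fun q => g < q.2) = 0 := by
          rw [List.countP_eq_zero]
          intro q hq
          rcases List.mem_cons.mp hq with h1 | h1
          · subst h1; simp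
          · simpa using not_lt.mpr (htle q h1)
        simp [hc]
      · apply List.map_congr_left
        intro p hp
        have hple : p.2 ≤ g := htle p hp
        have hcnt : (((i, g) :: t).countP (fun q => p.2 < q.2) : Int)
            = (if p.2 < g then 1 else 0) + (t.countP (fun q => p.2 < q.2) : Int) := by
          by_cases hlt : p.2 < g
          · simp [hlt]; ring
          · simp [hlt]
        rw [hcnt]
        by_cases hlt : p.2 < g
        · simp [hlt]; ring
        · simp [hlt]
    · have hglt : g < prev := lt_of_le_of_ne hgle hgp
      simp only [rankLoop, if_neg hgp]
      have : (1 : Int) + G + E = 1 + (G + E) := by ring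
      rw [this, ih g (G + E) 1 htp htle]
      simp only [List.map_cons]
      refine List.cons_eq_cons.mpr ⟨?_, ?_⟩
      · simp only [Prod.mk.injEq, true_and]
        have hc : ((i, g) :: t).countP (fun q => g < q.2) = 0 := by
          rw [List.countP_eq_zero]
          intro q hq
          rcases List.mem_cons.mp hq with h1 | h1
          · subst h1; simp
          · simpa using not_lt.mpr (htle q h1)
        simp [hc, hglt]
        ring
      · apply List.map_congr_left
        intro p hp
        have hple : p.2 ≤ g := htle p hp
        have hplt : p.2 < prev := lt_of_le_of_lt hple hglt
        have hcnt : (((i, g) :: t).countP (fun q => p.2 < q.2) : Int)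
            = (if p.2 < g then 1 else 0) + (t.countP (fun q => p.2 < q.2) : Int) := by
          by_cases hlt : p.2 < g
          · simp [hlt]; ring
          · simp [hlt]
        rw [hcnt]
        by_cases hlt : p.2 < g
        · simp [hlt, hplt]; ring
        · simp [hlt, hplt]; ring

theorem solution_spec : Claim_equal_solution := by
  intro grade _ hpre
  unfold Spec_solution
  simp only [solution]
  -- the index-pair build equals enumerate
  have hlst : (PySem.List.pyRange 0 (grade.length : Int) 1).foldl
      (fun acc i => acc ++ [(i, PySem.List.pyGetD grade i 0)]) []
      = PySem.List.enumerate grade 0 := by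
    rw [PySem.List.foldl_append_singleton_eq_map, PySem.List.enumerate_eq_map_pyRange (d := 0)]
    simp [PySem.List.len]
  rw [hlst]
  set enum := PySem.List.enumerate grade 0 with henum
  set s := PySem.List.sorted enum (fun p => -p.2) false with hs
  have hperm : s.Perm enum := PySem.List.sorted_perm ..
  have hcount : ∀ g : Int, s.countP (fun q => g < q.2) = grade.countP (fun h => g < h) := by
    intro g
    rw [hperm.countP_eq]
    have : enum.countP (fun q => g < q.2) = (enum.map (·.2)).countP (fun h => g < h) := by
      rw [List.countP_map]; rfl
    rw [this, PySem.List.map_snd_enumerate]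
  match hsm : s with
  | [] =>
    exfalso
    have : enum = [] := by
      rw [hsm] at hperm
      exact hperm.symm.eq_nil
    have : grade = [] := by
      cases grade with
      | nil => rfl
      | cons a l => simp [PySem.List.enumerate_cons, henum] at this
    exact hpre this
  | p0 :: rest =>
    simp only []
    have hpair : s.Pairwise (fun a b => b.2 ≤ a.2) := by
      have := PySem.List.sorted_pairwise (xs := enum) (key := fun p => -p.2)
      rw [← hs] at this
      exact this.imp (fun h => by omega)
    rw [hsm] at hpair
    have hrle : ∀ p ∈ rest, p.2 ≤ p0.2 := (List.pairwise_cons.mp hpair).1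
    have hrp : rest.Pairwise (fun a b => b.2 ≤ a.2) := (List.pairwise_cons.mp hpair).2
    have hloop : rankLoop p0.2 1 1 rest
        = rest.map (fun p => (p.1, p.2,
            1 + 0 + (if p.2 < p0.2 then 1 else 0) + (rest.countP (fun q => p.2 < q.2) : Int))) := by
      have := rankLoop_spec p0.2 0 1 rest hrp hrle
      simpa using this
    -- the whole ranked list is (p0 :: rest).map F with F p = 1 + #strictly greater in s
    have hranked : (p0.1, p0.2, (1 : Int)) :: rankLoop p0.2 1 1 rest
        = (p0 :: rest).map (fun p => (p.1, p.2,
            1 + (((p0 :: rest).countP (fun q => p.2 < q.2) : Nat) : Int))) := by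
      rw [hloop]
      simp only [List.map_cons]
      refine List.cons_eq_cons.mpr ⟨?_, ?_⟩
      · simp only [Prod.mk.injEq, true_and]
        have hc : ((p0 :: rest).countP (fun q => p0.2 < q.2)) = 0 := by
          rw [List.countP_eq_zero]
          intro q hq
          rcases List.mem_cons.mp hq with h1 | h1
          · subst h1; simp
          · simpa using not_lt.mpr (hrle q h1)
        simp [hc]
      · apply List.map_congr_left
        intro p hp
        have hcnt : (((p0 :: rest).countP (fun q => p.2 < q.2) : Nat) : Int)
            = (if p.2 < p0.2 then 1 else 0) + (rest.countP (fun q => p.2 < q.2) : Int) := by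
          by_cases hlt : p.2 < p0.2
          · simp [hlt]; ring
          · simp [hlt]
        rw [hcnt]
        by_cases hlt : p.2 < p0.2
        · simp [hlt]; ring
        · simp [hlt]
    rw [hranked]
    -- rewrite each rank via the global count over grade
    have hrank2 : (p0 :: rest).map (fun p => (p.1, p.2,
            1 + (((p0 :: rest).countP (fun q => p.2 < q.2) : Nat) : Int)))
        = (p0 :: rest).map (fun p => (p.1, p.2,
            1 + ((grade.countP (fun h => p.2 < h) : Nat) : Int))) := by
      apply List.map_congr_left
      intro p _
      have := hcount p.2
      rw [hsm] at this
      rw [this]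
    rw [hrank2, ← hsm]
    -- sorting by index restores enumerate order
    have hFperm : (s.map (fun p => (p.1, p.2, 1 + ((grade.countP (fun h => p.2 < h) : Nat) : Int)))).Perm
        (enum.map (fun p => (p.1, p.2, 1 + ((grade.countP (fun h => p.2 < h) : Nat) : Int)))) :=
      hperm.map _
    have hFpair : (enum.map (fun p => (p.1, p.2, 1 + ((grade.countP (fun h => p.2 < h) : Nat) : Int)))).Pairwise
        (fun a b => a.1 < b.1) := by
      refine List.pairwise_map.mpr ?_
      exact PySem.List.pairwise_lt_enumerate ..
    rw [PySem.List.sorted_eq_of_perm_of_pairwise_lt _ _ _ hFperm.symm hFpair]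
    rw [PySem.List.foldl_append_singleton_eq_map]
    simp only [List.nil_append, List.map_map]
    unfold solution_alt
    have : enum.map ((fun t : Int × Int × Int => t.2.2) ∘
        (fun p : Int × Int => (p.1, p.2, 1 + ((grade.countP (fun h => p.2 < h) : Nat) : Int))))
        = (enum.map (·.2)).map (fun g => 1 + ((grade.countP (fun h => g < h) : Nat) : Int)) := by
      rw [List.map_map]; rfl
    rw [this, PySem.List.map_snd_enumerate]
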